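-- pv_equiv track=rewrite | github.com/Pav-gm/spotify_project | spotify_operations.py | browse_json_items
-- ===== SOURCE A (Python) =====
-- def browse_json_items(total_items:int) -> list:
--     """
--     Generate a list of offsets to paginate through large sets of results.
--
--     Parameters:
--     - total (int): Total number of items.
--
--     Returns:
--     - list: List of offsets to be used for pagination,
--             including the exact number of items in the last batch.
--     """
--     OFFSET_LIMIT = 100
--     if total_items < 1:
--         return []
--     else:
--         all_pages = total_items // OFFSET_LIMIT
--         offsets = [i*100 for i in range(all_pages)]
--         if total_items % OFFSET_LIMIT:
--             last_offset = all_pages * OFFSET_LIMIT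
--             offsets.extend([last_offset,total_items])
--         return offsets
-- ===== SOURCE B (Python) =====
-- def browse_json_items(total_items: int) -> list:
--     """Build the offset list back-to-front: start from the tail ([total_items] iff a
--     partial last page exists), walk the multiples of 100 DOWNWARD from the largest
--     offset below total_items, and reverse once at the end."""
--     if total_items < 1:
--         return []
--     rev = [total_items] if total_items % 100 else []
--     off = ((total_items - 1) // 100) * 100
--     while off >= 0:
--         rev.append(off)
--         off -= 100
--     return rev[::-1]
-- ===== Notes on version B (the rewrite author's own statement) =====
-- stated objective: alternative
-- what changed: Instead of A's upward range-comprehension of total//100 multiples plus a two-element extend, B builds the list back-to-front: it seeds the tail ([total_items] iff a partial page exists), walks the multiples of 100 downward from ((total_items-1)//100)*100, and reverses once at the end.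
import Mathlib
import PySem

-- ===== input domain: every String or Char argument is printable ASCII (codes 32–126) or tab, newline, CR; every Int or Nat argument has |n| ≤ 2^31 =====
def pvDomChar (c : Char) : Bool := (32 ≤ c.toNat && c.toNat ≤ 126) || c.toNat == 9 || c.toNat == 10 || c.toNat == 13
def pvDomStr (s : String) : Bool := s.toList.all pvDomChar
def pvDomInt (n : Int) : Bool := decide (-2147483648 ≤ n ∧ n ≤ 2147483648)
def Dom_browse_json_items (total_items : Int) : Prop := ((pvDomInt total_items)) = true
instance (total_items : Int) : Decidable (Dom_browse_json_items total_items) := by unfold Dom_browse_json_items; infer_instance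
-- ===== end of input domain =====

-- B builds the list back-to-front: tail first, then the multiples of 100 walked
-- DOWNWARD from the largest offset below total_items, reversed once at the end
-- (alternative decomposition; same cost).

-- ===== PORT A =====
def browse_json_items (total_items : Int) : List Int :=
  if total_items < 1 then []
  else
    let all_pages := PySem.Int.floordiv total_items 100
    let offsets := (PySem.List.pyRange 0 all_pages 1).map (fun i => i * 100)
    if PySem.Int.mod total_items 100 ≠ 0 then
      offsets ++ [all_pages * 100, total_items]
    else offsets

-- ===== PORT B =====
-- the downward while loop of Source B: append off, off-100, … down to 0 onto rev
def pvDownB (off : Int) (rev : List Int) : List Int :=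
  if off ≥ 0 then pvDownB (off - 100) (rev ++ [off]) else rev
termination_by (off + 100).toNat
decreasing_by simp_wf; omega

def browse_json_items_alt (total_items : Int) : List Int :=
  if total_items < 1 then []
  else
    -- rev[::-1]: slice? with step -1 is total on lists, hence the getD
    (PySem.List.slice?
      (pvDownB (PySem.Int.floordiv (total_items - 1) 100 * 100)
        (if PySem.Int.mod total_items 100 ≠ 0 then [total_items] else []))
      none none (-1)).getD []

-- ===== PRECONDITION & SPEC =====
def Spec_browse_json_items (total_items : Int) (out : List Int) : Prop := out = browse_json_items_alt total_items
instance (total_items : Int) (out : List Int) : Decidable (Spec_browse_json_items total_items out) := by unfold Spec_browse_json_items; infer_instance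

-- ===== CLAIM (what is proved, stated in full; the proofs are below) =====
def Claim_equal_browse_json_items : Prop := ∀ (total_items : Int), Dom_browse_json_items total_items → Spec_browse_json_items total_items (browse_json_items total_items)

-- ===== LEMMAS AND PROOFS =====

-- the downward loop from k*100 appends exactly [k*100, (k-1)*100, …, 0]
theorem pvDownB_eq (k : Nat) : ∀ (rev : List Int),
    pvDownB ((k : Int) * 100) rev
      = rev ++ ((List.range (k + 1)).map (fun i => (i : Int) * 100)).reverse := by
  induction k with
  | zero =>
    intro rev
    rw [pvDownB, if_pos (by norm_num), pvDownB, if_neg (by norm_num)]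
    simp
  | succ k ih =>
    intro rev
    rw [pvDownB, if_pos (by positivity)]
    rw [show ((k + 1 : Nat) : Int) * 100 - 100 = (k : Int) * 100 by push_cast; ring]
    rw [ih]
    simp [List.range_succ]

theorem browse_json_items_spec : Claim_equal_browse_json_items := by
  intro total _
  unfold Spec_browse_json_items browse_json_items browse_json_items_alt
  by_cases hlt : total < 1
  · simp [hlt]
  · rw [if_neg hlt, if_neg hlt]
    set p := PySem.Int.floordiv total 100 with hp
    have hmul : p * 100 + PySem.Int.mod total 100 = total := PySem.Int.floordiv_mul_add_mod total 100
    have hr0 : 0 ≤ PySem.Int.mod total 100 := PySem.Int.mod_nonneg total (by norm_num)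
    have hr1 : PySem.Int.mod total 100 < 100 := PySem.Int.mod_lt total (by norm_num)
    set q := PySem.Int.floordiv (total - 1) 100 with hq
    have hmul' : q * 100 + PySem.Int.mod (total - 1) 100 = total - 1 :=
      PySem.Int.floordiv_mul_add_mod (total - 1) 100
    have hr0' : 0 ≤ PySem.Int.mod (total - 1) 100 := PySem.Int.mod_nonneg (total - 1) (by norm_num)
    have hr1' : PySem.Int.mod (total - 1) 100 < 100 := PySem.Int.mod_lt (total - 1) (by norm_num)
    have hArange : (PySem.List.pyRange 0 p 1).map (fun i => i * 100)
        = (List.range p.toNat).map (fun k => (k : Int) * 100) := by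
      rw [PySem.List.pyRange_one 0 p, List.map_map]
      simp [← List.map_eq_flatMap, Function.comp_def]
    by_cases hm : PySem.Int.mod total 100 = 0
    · -- exact multiple: q = p - 1, no tail element
      have hq' : q = p - 1 := by omega
      have hp1 : 1 ≤ p := by omega
      rw [if_neg (by simpa using hm), if_neg (by simpa using hm)]
      rw [hq']
      rw [show (p - 1) * 100 = ((p - 1).toNat : Int) * 100 by rw [Int.toNat_of_nonneg (by omega)]]
      rw [pvDownB_eq, PySem.List.slice?_none_none_neg_one, Option.getD_some]
      rw [show (p - 1).toNat + 1 = p.toNat by omega]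
      simp [hArange]
    · -- partial last page: q = p, tail = [total]
      have hq' : q = p := by omega
      rw [if_pos hm, if_pos hm]
      rw [hq']
      rw [show p * 100 = (p.toNat : Int) * 100 by rw [Int.toNat_of_nonneg (by omega)]]
      rw [pvDownB_eq, PySem.List.slice?_none_none_neg_one, Option.getD_some]
      rw [hArange, List.range_succ]
      simp
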